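-- pv_equiv track=rewrite | github.com/Yiming-S/MSDA-Bench | data_loader.py | _parse_subject_pipeline
-- ===== SOURCE A (Python) =====
-- PIPE_MAP = {
--     "MAP": "MAP",
--     "DWP": "DWP",
--     "MMP_merge_then_adapt": "MMP_mta",
--     "MMP_moe": "MMP_moe",
--     "BDP": "BDP_fb",
--     "BDP_bridge_to_far": "BDP_bf",
-- }
--
-- def _parse_subject_pipeline(remainder: str):
--     """Parse '{subject}_{pipeline_code}' from the remainder after dataset prefix.
--
--     Tries to match against known pipeline code names (longest first)
--     so that multi-part names like 'BDP_bridge_to_far' are handled correctly.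
--
--     Returns (subject_str, pipeline_code) or (None, None).
--     """
--     # Sort pipeline codes longest first to greedily match
--     sorted_codes = sorted(PIPE_MAP.keys(), key=len, reverse=True)
--     for code in sorted_codes:
--         suffix = f"_{code}"
--         if remainder.endswith(suffix):
--             subject_str = remainder[: -len(suffix)]
--             if subject_str.isdigit():
--                 return subject_str, code
--     return None, None
-- ===== SOURCE B (Python) =====
-- PIPE_MAP = {
--     "MAP": "MAP",
--     "DWP": "DWP",
--     "MMP_merge_then_adapt": "MMP_mta",
--     "MMP_moe": "MMP_moe",
--     "BDP": "BDP_fb",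
--     "BDP_bridge_to_far": "BDP_bf",
-- }
--
-- def _parse_subject_pipeline(remainder: str):
--     """Split once at the first underscore: a digit subject can never contain
--     '_', so the first underscore is always the subject/code boundary."""
--     i = remainder.find("_")
--     if i == -1:
--         return None, None
--     subject = remainder[:i]
--     code = remainder[i + 1:]
--     if subject.isdigit() and code in PIPE_MAP:
--         return subject, code
--     return None, None
-- ===== Notes on version B (the rewrite author's own statement) =====
-- stated objective: simpler
-- what changed: B replaces A's sort of the pipeline codes and per-code suffix scan by a single split at the first underscore followed by one dict membership test (valid because a digit subject contains no underscore).
import Mathlib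
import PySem

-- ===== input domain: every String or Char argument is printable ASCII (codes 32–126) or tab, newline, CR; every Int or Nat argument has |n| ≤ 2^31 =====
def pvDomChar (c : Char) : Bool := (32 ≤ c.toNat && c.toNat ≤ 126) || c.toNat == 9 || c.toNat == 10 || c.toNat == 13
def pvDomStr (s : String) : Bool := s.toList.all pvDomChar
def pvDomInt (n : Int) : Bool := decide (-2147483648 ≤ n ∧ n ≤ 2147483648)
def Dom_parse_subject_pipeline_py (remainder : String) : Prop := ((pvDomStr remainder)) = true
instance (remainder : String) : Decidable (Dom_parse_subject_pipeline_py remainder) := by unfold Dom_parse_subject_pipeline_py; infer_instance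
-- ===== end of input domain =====

-- B replaces A's sort of the pipeline codes and the per-code suffix scan by one split at the
-- first underscore plus a single dict membership test (a digit subject contains no underscore);
-- objective: simpler.


-- ===== PORT A =====
-- the module-level PIPE_MAP dict (shared by both ports)
def pvPipeMap : PySem.Dict String String :=
  ((((((PySem.Dict.empty).insert "MAP" "MAP").insert "DWP" "DWP").insert
      "MMP_merge_then_adapt" "MMP_mta").insert "MMP_moe" "MMP_moe").insert
      "BDP" "BDP_fb").insert "BDP_bridge_to_far" "BDP_bf"

-- the 'for code in sorted_codes' loop of A, with its early return
def pvLoopA (remainder : String) : List String → Option String × Option String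
  | [] => (none, none)
  | code :: rest =>
    -- f"_{code}" built on the char level (String.append is kernel-opaque; exact)
    let suffix : String := String.ofList ('_' :: code.toList)
    if PySem.Str.endswith remainder suffix then
      let subject_str := PySem.Str.slice remainder none (some (-(PySem.Str.len suffix)))
      if PySem.Str.strIsdigit subject_str then (some subject_str, some code)
      else pvLoopA remainder rest
    else pvLoopA remainder rest

def parse_subject_pipeline_py (remainder : String) : Option String × Option String :=
  let sorted_codes := PySem.List.sorted pvPipeMap.keys (fun s => PySem.Str.len s) true
  pvLoopA remainder sorted_codes

-- ===== PORT B =====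
def parse_subject_pipeline_py_alt (remainder : String) : Option String × Option String :=
  let i := PySem.Str.find remainder "_"
  if i = -1 then (none, none)
  else
    let subject := PySem.Str.slice remainder none (some i)
    let code := PySem.Str.slice remainder (some (i + 1)) none
    if PySem.Str.strIsdigit subject && pvPipeMap.contains code then (some subject, some code)
    else (none, none)

-- ===== PRECONDITION & SPEC =====
def Spec_parse_subject_pipeline_py (remainder : String) (out : Option String × Option String) : Prop := out = parse_subject_pipeline_py_alt remainder
instance (remainder : String) (out : Option String × Option String) : Decidable (Spec_parse_subject_pipeline_py remainder out) := by unfold Spec_parse_subject_pipeline_py; infer_instance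

-- ===== CLAIM (what is proved, stated in full; the proofs are below) =====
def Claim_equal_parse_subject_pipeline_py : Prop := ∀ (remainder : String), Dom_parse_subject_pipeline_py remainder → Spec_parse_subject_pipeline_py remainder (parse_subject_pipeline_py remainder)

-- ===== LEMMAS AND PROOFS =====

theorem pv_no_underscore {p : List Char} (h : PySem.Chars.strIsdigit p = true) : '_' ∉ p := by
  intro hm
  simp only [PySem.Chars.strIsdigit, Bool.and_eq_true, List.all_eq_true] at h
  have := h.2 _ hm
  simp [PySem.Chars.isdigit] at this

theorem pv_decomp_unique {p1 : List Char} {p2 s1 s2 : List Char}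
    (h : p1 ++ '_' :: s1 = p2 ++ '_' :: s2) (h1 : '_' ∉ p1) (h2 : '_' ∉ p2) :
    p1 = p2 ∧ s1 = s2 := by
  induction p1 generalizing p2 with
  | nil =>
    cases p2 with
    | nil => simpa using h
    | cons b t =>
      simp only [List.nil_append, List.cons_append, List.cons.injEq] at h
      exact absurd (h.1 ▸ List.mem_cons_self) h2
  | cons a t ih =>
    cases p2 with
    | nil =>
      simp only [List.nil_append, List.cons_append, List.cons.injEq] at h
      exact absurd (h.1 ▸ List.mem_cons_self) h1
    | cons b t2 =>
      simp only [List.cons_append, List.cons.injEq] at h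
      obtain ⟨rfl, h⟩ := h
      have := ih h (fun hm => h1 (List.mem_cons_of_mem _ hm)) (fun hm => h2 (List.mem_cons_of_mem _ hm))
      exact ⟨by rw [this.1], this.2⟩

theorem pv_prefix_drop {l : List Char} {j : Nat} {c : Char} :
    [c] <+: l.drop j ↔ l[j]? = some c := by
  rw [← List.head?_drop]
  constructor
  · rintro ⟨t, ht⟩; rw [← ht]; rfl
  · intro hj
    cases hd : l.drop j with
    | nil => rw [hd] at hj; simp at hj
    | cons a t => rw [hd] at hj; simp at hj; exact ⟨t, by simp [hj]⟩

theorem pv_find_none {l : List Char} (h : '_' ∉ l) :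
    PySem.Chars.find l ['_'] = -1 := by
  rw [PySem.Chars.find_eq_neg_one_iff]
  rintro ⟨s, t, hst⟩
  exact h (by rw [← hst]; simp)

theorem pv_find_singleton {p s : List Char} (hp : '_' ∉ p) :
    PySem.Chars.find (p ++ '_' :: s) ['_'] = (p.length : Int) := by
  set l := p ++ '_' :: s with hl
  have hinf : ['_'] <:+: l := ⟨p, s, by simp [hl]⟩
  have h0 : 0 ≤ PySem.Chars.find l ['_'] := (PySem.Chars.find_nonneg_iff _ _).2 hinf
  obtain ⟨hpre, hmin⟩ := PySem.Chars.find_spec h0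
  have hlp : l[p.length]? = some '_' := by
    simp [hl]
  have hle : (PySem.Chars.find l ['_']).toNat ≤ p.length := by
    by_contra hgt
    simp at hgt
    exact hmin p.length (by omega) (pv_prefix_drop.2 hlp)
  have heq : (PySem.Chars.find l ['_']).toNat = p.length := by
    rcases lt_or_eq_of_le hle with hlt | he
    · have h1 : l[(PySem.Chars.find l ['_']).toNat]? = some '_' := pv_prefix_drop.1 hpre
      rw [hl, List.getElem?_append_left (by omega)] at h1
      exact absurd (List.mem_of_getElem? h1) hp
    · exact he
  omega

def pvMatch (l : List Char) (code : String) : Prop :=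
  ∃ p : List Char, l = p ++ '_' :: code.toList ∧ PySem.Chars.strIsdigit p = true

theorem pv_subject_toList (r c0 : String) {t : List Char}
    (ht : r.toList = t ++ '_' :: c0.toList) :
    (PySem.Str.slice r none (some (-(PySem.Str.len (String.ofList ('_' :: c0.toList)))))).toList = t := by
  rw [PySem.Str.toList_slice]
  simp only [PySem.Chars.slice_eq_listSlice, PySem.Str.len_eq, String.toList_ofList]
  rw [PySem.List.slice_to_neg_natCast _ _ (by simp)]
  rw [ht]
  simp only [List.length_append, List.length_cons]
  have : t.length + ('_' :: c0.toList).length - ('_' :: c0.toList).length = t.length := by simp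
  simp only [List.length_cons] at this
  rw [show t.length + (c0.toList.length + 1) - (c0.toList.length + 1) = t.length by omega]
  exact List.take_left ..

theorem pv_endswith_true (r c0 : String) {t : List Char}
    (ht : r.toList = t ++ '_' :: c0.toList) :
    PySem.Str.endswith r (String.ofList ('_' :: c0.toList)) = true := by
  rw [PySem.Str.endswith_eq, PySem.Chars.endswith_iff]
  exact ⟨t, by simp [ht]⟩

theorem pv_loopA_none {r : String} {codes : List String}
    (h : ∀ c ∈ codes, ¬ pvMatch r.toList c) : pvLoopA r codes = (none, none) := by
  induction codes with
  | nil => rfl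
  | cons c rest ih =>
    have hrest : ∀ c' ∈ rest, ¬ pvMatch r.toList c' := fun c' hm => h c' (List.mem_cons_of_mem _ hm)
    by_cases he : PySem.Str.endswith r (String.ofList ('_' :: c.toList)) = true
    · -- suffix matches; digit test must fail
      have hsuf : ('_' :: c.toList) <:+ r.toList := by
        rw [PySem.Str.endswith_eq, PySem.Chars.endswith_iff] at he
        simpa using he
      obtain ⟨t, ht⟩ := hsuf
      have ht' : r.toList = t ++ '_' :: c.toList := ht.symm
      have hdig : PySem.Chars.strIsdigit t = false := by
        by_contra hd
        simp only [Bool.not_eq_false] at hd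
        exact h c List.mem_cons_self ⟨t, ht', hd⟩
      simp only [pvLoopA, he, if_true]
      rw [PySem.Str.strIsdigit_eq, pv_subject_toList r c ht', hdig]
      simpa using ih hrest
    · simp only [pvLoopA, if_neg he]
      exact ih hrest

theorem pv_loopA_hit {r : String} {codes : List String} {c0 : String} {p : List Char}
    (hmem : c0 ∈ codes) (hdec : r.toList = p ++ '_' :: c0.toList)
    (hdig : PySem.Chars.strIsdigit p = true)
    (huniq : ∀ c ∈ codes, pvMatch r.toList c → c = c0) :
    pvLoopA r codes = (some (PySem.Str.slice r none (some (-(PySem.Str.len (String.ofList ('_' :: c0.toList)))))), some c0) := by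
  induction codes with
  | nil => cases hmem
  | cons c rest ih =>
    by_cases hc : c = c0
    · subst hc
      simp only [pvLoopA, pv_endswith_true r c hdec, if_true]
      rw [PySem.Str.strIsdigit_eq, pv_subject_toList r c hdec, hdig]
      simp
    · have hnm : ¬ pvMatch r.toList c := fun hm => hc (huniq c List.mem_cons_self hm)
      have hmem' : c0 ∈ rest := by
        cases List.mem_cons.1 hmem with
        | inl h => exact absurd h.symm hc
        | inr h => exact h
      have step : pvLoopA r (c :: rest) = pvLoopA r rest := by
        by_cases he : PySem.Str.endswith r (String.ofList ('_' :: c.toList)) = true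
        · have hsuf : ('_' :: c.toList) <:+ r.toList := by
            rw [PySem.Str.endswith_eq, PySem.Chars.endswith_iff] at he
            simpa using he
          obtain ⟨t, ht⟩ := hsuf
          have ht' : r.toList = t ++ '_' :: c.toList := ht.symm
          have hdigf : PySem.Chars.strIsdigit t = false := by
            by_contra hd
            simp only [Bool.not_eq_false] at hd
            exact hnm ⟨t, ht', hd⟩
          simp only [pvLoopA, he, if_true]
          rw [PySem.Str.strIsdigit_eq, pv_subject_toList r c ht', hdigf]
          simp
        · simp only [pvLoopA, if_neg he]
      rw [step]
      exact ih hmem' (fun c' h' => huniq c' (List.mem_cons_of_mem _ h'))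

theorem pv_contains_iff (c : String) :
    pvPipeMap.contains c = true ↔
      c ∈ ["MMP_merge_then_adapt", "BDP_bridge_to_far", "MMP_moe", "MAP", "DWP", "BDP"] := by
  simp [pvPipeMap, PySem.Dict.contains_insert, PySem.Dict.contains_empty]
  constructor <;> intro h <;> rcases h with h|h|h|h|h|h <;> simp [h]

theorem pv_sorted_codes :
    PySem.List.sorted pvPipeMap.keys (fun s => PySem.Str.len s) true =
      ["MMP_merge_then_adapt", "BDP_bridge_to_far", "MMP_moe", "MAP", "DWP", "BDP"] := by
  decide

theorem pv_first_split {l : List Char} (h : '_' ∈ l) :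
    ∃ p s, l = p ++ '_' :: s ∧ '_' ∉ p := by
  induction l with
  | nil => cases h
  | cons a t ih =>
    by_cases ha : a = '_'
    · exact ⟨[], t, by simp [ha], by simp⟩
    · have ht : '_' ∈ t := by
        cases List.mem_cons.1 h with
        | inl h' => exact absurd h'.symm ha
        | inr h' => exact h'
      obtain ⟨p, s, h1, h2⟩ := ih ht
      exact ⟨a :: p, s, by simp [h1], by
        intro hm
        cases List.mem_cons.1 hm with
        | inl h' => exact ha h'.symm
        | inr h' => exact h2 h'⟩

set_option maxHeartbeats 1000000 in
theorem pv_main (r : String) : parse_subject_pipeline_py r = parse_subject_pipeline_py_alt r := by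
  simp only [parse_subject_pipeline_py, parse_subject_pipeline_py_alt]
  rw [pv_sorted_codes]
  have hfind : PySem.Str.find r "_" = PySem.Chars.find r.toList ['_'] := by
    rw [PySem.Str.find_eq]
    rfl
  by_cases hin : '_' ∈ r.toList
  · obtain ⟨p, s, hl, hnp⟩ := pv_first_split hin
    have hf : PySem.Str.find r "_" = (p.length : Int) := by
      rw [hfind, hl, pv_find_singleton hnp]
    rw [hf, if_neg (by omega)]
    have hsub : (PySem.Str.slice r none (some (p.length : Int))).toList = p := by
      rw [PySem.Str.toList_slice]
      simp only [PySem.Chars.slice_eq_listSlice]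
      rw [PySem.List.slice_to _ (by omega)]
      rw [hl]
      simp
    have hcode : (PySem.Str.slice r (some ((p.length : Int) + 1)) none).toList = s := by
      rw [PySem.Str.toList_slice]
      simp only [PySem.Chars.slice_eq_listSlice]
      rw [PySem.List.slice_from _ (by omega)]
      rw [hl, show ((p.length : Int) + 1).toNat = p.length + 1 by omega,
          show p ++ '_' :: s = (p ++ ['_']) ++ s by simp]
      rw [List.drop_left' (by simp)]
    obtain ⟨subjStr, hss⟩ : ∃ x, PySem.Str.slice r none (some (p.length : Int)) = x := ⟨_, rfl⟩
    obtain ⟨codeStr, hcs⟩ : ∃ x, PySem.Str.slice r (some ((p.length : Int) + 1)) none = x := ⟨_, rfl⟩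
    rw [hss] at hsub
    rw [hcs] at hcode
    rw [hss, hcs]
    by_cases hd : PySem.Chars.strIsdigit p = true
    · by_cases hc : pvPipeMap.contains codeStr = true
      · have hdec : r.toList = p ++ '_' :: codeStr.toList := by rw [hcode]; exact hl
        have hmem : codeStr ∈ ["MMP_merge_then_adapt", "BDP_bridge_to_far", "MMP_moe", "MAP", "DWP", "BDP"] :=
          (pv_contains_iff codeStr).1 hc
        have huniq : ∀ c ∈ ["MMP_merge_then_adapt", "BDP_bridge_to_far", "MMP_moe", "MAP", "DWP", "BDP"],
            pvMatch r.toList c → c = codeStr := by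
          rintro c _ ⟨p', hp', hd'⟩
          have hcomb : p' ++ '_' :: c.toList = p ++ '_' :: codeStr.toList := by
            rw [← hp', ← hdec]
          have heq := pv_decomp_unique hcomb (pv_no_underscore hd') hnp
          exact String.toList_inj.1 heq.2
        rw [pv_loopA_hit hmem hdec hd huniq]
        rw [PySem.Str.strIsdigit_eq, hsub, hd, hc]
        simp only [Bool.and_self, if_true]
        refine Prod.ext ?_ rfl
        simp only [Option.some.injEq]
        refine String.toList_inj.1 ?_
        rw [pv_subject_toList r codeStr hdec, hsub]
      · rw [PySem.Str.strIsdigit_eq, hsub, hd]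
        simp only [Bool.true_and]
        rw [if_neg (by simp [hc])]
        apply pv_loopA_none
        rintro c hcmem ⟨p', hp', hd'⟩
        have hcomb : p' ++ '_' :: c.toList = p ++ '_' :: s := by rw [← hp', ← hl]
        have heq := pv_decomp_unique hcomb (pv_no_underscore hd') hnp
        apply hc
        rw [pv_contains_iff]
        have hce : c = codeStr := String.toList_inj.1 (by rw [hcode, heq.2])
        exact hce ▸ hcmem
    · rw [PySem.Str.strIsdigit_eq, hsub]
      simp only [Bool.not_eq_true] at hd
      rw [hd]
      have hff : (false && pvPipeMap.contains codeStr) = false := by simp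
      rw [hff, if_neg (by simp)]
      apply pv_loopA_none
      rintro c _ ⟨p', hp', hd'⟩
      have hcomb : p' ++ '_' :: c.toList = p ++ '_' :: s := by rw [← hp', ← hl]
      have heq := pv_decomp_unique hcomb (pv_no_underscore hd') hnp
      rw [heq.1] at hd'
      rw [hd'] at hd
      cases hd
  · have hf : PySem.Str.find r "_" = -1 := by rw [hfind, pv_find_none hin]
    rw [hf, if_pos rfl]
    apply pv_loopA_none
    rintro c _ ⟨p', hp', _⟩
    exact hin (by rw [hp']; simp)

-- ===== VERDICT (by name: the statement is the Claim_ definition above) =====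
theorem parse_subject_pipeline_py_spec : Claim_equal_parse_subject_pipeline_py := by
  intro r _
  exact pv_main r
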